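-- pv_equiv track=rewrite | github.com/deegeeartz/nigeria-legal-mvp | app/repos/connection.py | _convert_qmark_sql
-- ===== SOURCE A (Python) =====
-- from typing import Any
--
-- def _convert_qmark_sql(sql: str, params: tuple[Any, ...] | list[Any]) -> tuple[str, dict[str, Any]]:
--     placeholder_count = sql.count("?")
--     if placeholder_count == 0:
--         return sql, {}
--     if placeholder_count != len(params):
--         raise ValueError(f"Placeholder count mismatch. SQL has {placeholder_count} placeholders, got {len(params)} params")
--
--     chunks = sql.split("?")
--     converted = chunks[0]
--     binds: dict[str, Any] = {}
--     for index, value in enumerate(params):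
--         key = f"p{index}"
--         converted += f":{key}{chunks[index + 1]}"
--         binds[key] = value
--     return converted, binds
-- ===== SOURCE B (Python) =====
-- def _convert_qmark_sql(sql, params):
--     placeholder_count = sql.count("?")
--     if placeholder_count == 0:
--         return sql, {}
--     if placeholder_count != len(params):
--         raise ValueError(f"Placeholder count mismatch. SQL has {placeholder_count} placeholders, got {len(params)} params")
--
--     keys = [f"p{i}" for i in range(placeholder_count)]
--     it = iter(keys)
--     converted = "".join(f":{next(it)}" if ch == "?" else ch for ch in sql)
--     return converted, dict(zip(keys, params))
-- ===== Notes on version B (the rewrite author's own statement) =====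
-- stated objective: alternative
-- what changed: Replaces A's single loop over split-chunks that simultaneously concatenates text and fills the dict by three staged passes: precompute the key list p0..pn-1, render the text with a single str.join over a generator that consumes an iterator of those keys at each '?', and build the binds dict once with dict(zip(keys, params)).
import Mathlib
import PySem

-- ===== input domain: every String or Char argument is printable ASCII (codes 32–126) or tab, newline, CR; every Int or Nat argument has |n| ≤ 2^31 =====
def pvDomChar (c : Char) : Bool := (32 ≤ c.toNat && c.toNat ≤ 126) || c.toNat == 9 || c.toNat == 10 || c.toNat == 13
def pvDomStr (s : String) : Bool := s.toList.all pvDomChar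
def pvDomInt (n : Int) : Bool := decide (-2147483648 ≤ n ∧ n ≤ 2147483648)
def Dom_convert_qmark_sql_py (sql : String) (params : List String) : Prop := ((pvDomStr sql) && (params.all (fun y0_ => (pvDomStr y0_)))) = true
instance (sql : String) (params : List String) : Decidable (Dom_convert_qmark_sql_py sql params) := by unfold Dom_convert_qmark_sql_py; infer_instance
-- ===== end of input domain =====

-- B replaces A's single split-chunks loop (which concatenates text and fills the dict
-- together) by three staged passes: a precomputed key list p0..pn-1, a join over the
-- characters consuming an iterator of those keys at each '?', and dict(zip(keys, params)).
-- Alternative decomposition, same cost. Equivalence is about the return value.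

-- ===== PORT A =====
-- A's loop body over enumerate(params): appends ':pk' + chunks[k+1] and binds the key.
def aStep (chunks : List (List Char)) (st : List Char × PySem.Dict String String)
    (iv : Int × String) : List Char × PySem.Dict String String :=
  let key := 'p' :: PySem.Int.toChars iv.1
  (st.1 ++ ':' :: key ++ PySem.List.pyGetD chunks (iv.1 + 1) [],
   st.2.insert (String.ofList key) iv.2)

def convert_qmark_sql_py (sql : String) (params : List String) :
    String × (List (String × String)) :=
  let placeholder_count := PySem.Chars.count sql.toList ['?']
  if placeholder_count = 0 then (sql, [])
  else
    -- placeholder_count ≠ params.length: A raises ValueError there (excluded by Pre_)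
    let chunks := PySem.Chars.splitOn sql.toList ['?']
    let st := (PySem.List.enumerate params 0).foldl (aStep chunks)
      (PySem.List.pyGetD chunks 0 [], PySem.Dict.empty)
    (String.ofList st.1, st.2.items)

-- ===== PORT B =====
-- B's join: the generator emits ':' + next key for '?', the character itself otherwise.
def bEmit : List Char → List String → List Char
  | [], _ => []
  | c :: cs, ks =>
      if c = '?' then ':' :: (ks.headD "").toList ++ bEmit cs ks.tail
      else c :: bEmit cs ks

def convert_qmark_sql_py_alt (sql : String) (params : List String) :
    String × (List (String × String)) :=
  let placeholder_count := PySem.Chars.count sql.toList ['?']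
  if placeholder_count = 0 then (sql, [])
  else
    -- placeholder_count ≠ params.length: B raises ValueError there (excluded by Pre_)
    let keys := (PySem.List.pyRange 0 (placeholder_count : Int) 1).map
      (fun i => String.ofList ('p' :: PySem.Int.toChars i))
    (String.ofList (bEmit sql.toList keys), (PySem.Dict.ofList (keys.zip params)).items)

-- ===== PRECONDITION & SPEC =====
-- Pre_ excludes exactly the inputs where both Pythons raise ValueError:
-- a positive '?' count that differs from len(params).
def Pre_convert_qmark_sql_py (sql : String) (params : List String) : Prop :=
  sql.toList.count '?' = 0 ∨ sql.toList.count '?' = params.length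
instance (sql : String) (params : List String) : Decidable (Pre_convert_qmark_sql_py sql params) := by
  unfold Pre_convert_qmark_sql_py; infer_instance

def pvWitness_convert_qmark_sql_py : String × List String :=
  ("a=? b=?", ["1", "2"])

def Spec_convert_qmark_sql_py (sql : String) (params : List String)
    (out : String × (List (String × String))) : Prop :=
  out = convert_qmark_sql_py_alt sql params
instance (sql : String) (params : List String) (out : String × (List (String × String))) :
    Decidable (Spec_convert_qmark_sql_py sql params out) := by
  unfold Spec_convert_qmark_sql_py; infer_instance

-- ===== CLAIM (what is proved, stated in full; the proofs are below) =====
def Claim_equal_convert_qmark_sql_py : Prop := ∀ (sql : String) (params : List String), Dom_convert_qmark_sql_py sql params → Pre_convert_qmark_sql_py sql params → Spec_convert_qmark_sql_py sql params (convert_qmark_sql_py sql params)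

-- ===== LEMMAS AND PROOFS =====

theorem countGo_q (l : List Char) (fuel acc : Nat) (h : l.length ≤ fuel) :
    PySem.Chars.count.go ['?'] fuel l acc = acc + l.count '?' := by
  induction l generalizing fuel acc with
  | nil => cases fuel <;> simp [PySem.Chars.count.go]
  | cons c rest ih =>
      cases fuel with
      | zero => simp at h
      | succ f =>
        by_cases hc : c = '?'
        · simp [PySem.Chars.count.go, List.isPrefixOf, hc,
            ih _ (acc + 1) (by simpa using h)]
          omega
        · simp [PySem.Chars.count.go, List.isPrefixOf, hc,
            ih _ acc (by simpa using h)]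
          simp [Ne.symm hc]

theorem count_q (cs : List Char) : PySem.Chars.count cs ['?'] = cs.count '?' := by
  simpa [PySem.Chars.count] using countGo_q cs cs.length 0 le_rfl

-- A recursive description of split on the single character '?'.
def splitQ : List Char → List (List Char)
  | [] => [[]]
  | c :: rest =>
      if c = '?' then [] :: splitQ rest
      else
        match splitQ rest with
        | p :: ps => (c :: p) :: ps
        | [] => [[c]]

theorem splitQ_ne_nil (cs : List Char) : splitQ cs ≠ [] := by
  cases cs with
  | nil => simp [splitQ]
  | cons c rest =>
      simp only [splitQ]
      split
      · simp
      · split <;> simp_all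

theorem splitGo_q (l : List Char) (fuel : Nat) (cur : List Char) (acc : List (List Char))
    (h : l.length ≤ fuel) :
    PySem.Chars.splitOn.go ['?'] fuel l cur acc
      = acc.reverse ++ (splitQ l).modifyHead (cur.reverse ++ ·) := by
  induction l generalizing fuel cur acc with
  | nil => cases fuel <;> simp [PySem.Chars.splitOn.go, splitQ]
  | cons c rest ih =>
      cases fuel with
      | zero => simp at h
      | succ f =>
        by_cases hc : c = '?'
        · simp [PySem.Chars.splitOn.go, List.isPrefixOf, hc,
            ih f [] (cur.reverse :: acc) (by simpa using h), splitQ]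
          cases splitQ rest <;> simp
        · obtain ⟨p, ps, hps⟩ : ∃ p ps, splitQ rest = p :: ps := by
            cases hr : splitQ rest with
            | nil => exact absurd hr (splitQ_ne_nil rest)
            | cons p ps => exact ⟨p, ps, rfl⟩
          simp [PySem.Chars.splitOn.go, List.isPrefixOf, hc,
            ih f (c :: cur) acc (by simpa using h), splitQ, hps,
            show ¬('?' = c) from fun h' => hc h'.symm]

theorem split_q (cs : List Char) : PySem.Chars.splitOn cs ['?'] = splitQ cs := by
  have := splitGo_q cs (cs.length + 1) [] [] (by omega)
  rw [PySem.Chars.splitOn, this]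
  cases hq : splitQ cs <;> simp

-- proof-side recursions describing what the two programs build
def scanT : List Char → Nat → List Char
  | [], _ => []
  | c :: rest, i =>
      if c = '?' then ':' :: 'p' :: PySem.Int.toChars (i : Int) ++ scanT rest (i + 1)
      else c :: scanT rest i

def aText (chunks : List (List Char)) : List String → Nat → List Char
  | [], _ => []
  | _ :: rest, i =>
      ':' :: 'p' :: PySem.Int.toChars (i : Int)
        ++ PySem.List.pyGetD chunks ((i : Int) + 1) [] ++ aText chunks rest (i + 1)

def aPairs : List String → Nat → List (String × String)
  | [], _ => []
  | v :: rest, i => (String.ofList ('p' :: PySem.Int.toChars (i : Int)), v) :: aPairs rest (i + 1)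

def weave : List (List Char) → List String → Nat → List Char
  | _, [], _ => []
  | chs, _ :: rest, i =>
      ':' :: 'p' :: PySem.Int.toChars (i : Int) ++ chs.headD [] ++ weave chs.tail rest (i + 1)

def insFold (d : PySem.Dict String String) (l : List (String × String)) :
    PySem.Dict String String :=
  l.foldl (fun d kv => d.insert kv.1 kv.2) d

theorem afold (chunks : List (List Char)) (ps : List String) : ∀ (i : Nat) (acc : List Char)
    (d : PySem.Dict String String),
    (PySem.List.enumerate ps (i : Int)).foldl (aStep chunks) (acc, d)
      = (acc ++ aText chunks ps i, insFold d (aPairs ps i)) := by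
  induction ps with
  | nil => intro i acc d; simp [PySem.List.enumerate_nil, aText, aPairs, insFold]
  | cons v rest ih =>
      intro i acc d
      rw [PySem.List.enumerate_cons, List.foldl_cons]
      have hcast : (i : Int) + 1 = ((i + 1 : Nat) : Int) := by push_cast; ring
      rw [hcast, show aStep chunks (acc, d) ((i : Int), v)
            = (acc ++ ':' :: 'p' :: PySem.Int.toChars (i : Int)
                ++ PySem.List.pyGetD chunks ((i : Int) + 1) [],
               d.insert (String.ofList ('p' :: PySem.Int.toChars (i : Int))) v) from by
          simp [aStep], ih]
      simp [aText, aPairs, insFold]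

theorem headD_drop {α : Type} (xs : List α) (n : Nat) (d : α) :
    (xs.drop n).headD d = xs.getD n d := by
  simp [List.headD_eq_head?_getD, List.head?_drop, List.getD]

theorem aText_weave (chunks : List (List Char)) (ps : List String) : ∀ (i : Nat),
    aText chunks ps i = weave (chunks.drop (i + 1)) ps i := by
  induction ps with
  | nil => intro i; simp [aText, weave]
  | cons v rest ih =>
      intro i
      have hcast : (i : Int) + 1 = ((i + 1 : Nat) : Int) := by push_cast; ring
      rw [aText, weave, hcast, PySem.List.pyGetD_natCast, ih (i + 1),
        ← headD_drop chunks (i + 1) []]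
      simp [List.tail_drop]

theorem text_bridge (cs : List Char) : ∀ (ps : List String) (i : Nat),
    cs.count '?' = ps.length →
    (splitQ cs).headD [] ++ weave ((splitQ cs).tail) ps i = scanT cs i := by
  induction cs with
  | nil =>
      intro ps i h
      have : ps = [] := List.length_eq_zero_iff.mp (by simpa using h.symm)
      simp [this, splitQ, weave, scanT]
  | cons c rest ih =>
      intro ps i h
      by_cases hc : c = '?'
      · subst hc
        obtain ⟨v, ps', rfl⟩ : ∃ v ps', ps = v :: ps' := by
          cases ps with
          | nil => simp [List.count_cons] at h
          | cons v ps' => exact ⟨v, ps', rfl⟩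
        have hsp : splitQ ('?' :: rest) = [] :: splitQ rest := by
          rw [splitQ]; simp
        have h' : rest.count '?' = ps'.length := by
          simp [List.count_cons] at h; omega
        rw [hsp, List.headD_cons, List.tail_cons, List.nil_append, scanT, if_pos rfl,
          weave, List.append_assoc, ih ps' (i + 1) h']
      · obtain ⟨p, pstail, hps⟩ : ∃ p t, splitQ rest = p :: t := by
          cases hr : splitQ rest with
          | nil => exact absurd hr (splitQ_ne_nil rest)
          | cons p t => exact ⟨p, t, rfl⟩
        have hsp : splitQ (c :: rest) = (c :: p) :: pstail := by
          rw [splitQ, if_neg hc, hps]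
        have h' : rest.count '?' = ps.length := by
          simp [List.count_cons, hc] at h; omega
        have hih := ih ps i h'
        rw [hps, List.headD_cons, List.tail_cons] at hih
        rw [hsp, List.headD_cons, List.tail_cons, scanT, if_neg hc, List.cons_append, hih]

-- B-side: the key list drawn from range(i, m) lets bEmit rebuild scanT
theorem bEmit_scanT (cs : List Char) : ∀ (i m : Nat), i + cs.count '?' ≤ m →
    bEmit cs ((PySem.List.pyRange (i : Int) (m : Int) 1).map
      (fun j => String.ofList ('p' :: PySem.Int.toChars j))) = scanT cs i := by
  induction cs with
  | nil => intro i m _; simp [bEmit, scanT]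
  | cons c rest ih =>
      intro i m h
      by_cases hc : c = '?'
      · have him : (i : Int) < (m : Int) := by
          have : i < m := by simp [List.count_cons, hc] at h; omega
          exact_mod_cast this
        rw [PySem.List.pyRange_one_cons him, List.map_cons]
        have hcast : (i : Int) + 1 = ((i + 1 : Nat) : Int) := by push_cast; ring
        rw [show bEmit (c :: rest)
              ((String.ofList ('p' :: PySem.Int.toChars (i : Int))) ::
                (PySem.List.pyRange ((i : Int) + 1) (m : Int) 1).map
                  (fun j => String.ofList ('p' :: PySem.Int.toChars j)))
            = ':' :: 'p' :: PySem.Int.toChars (i : Int)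
              ++ bEmit rest ((PySem.List.pyRange ((i : Int) + 1) (m : Int) 1).map
                  (fun j => String.ofList ('p' :: PySem.Int.toChars j))) from by
            simp [bEmit, hc, String.toList_ofList], hcast,
          ih (i + 1) m (by simp [List.count_cons, hc] at h; omega), scanT, if_pos hc]
      · rw [show bEmit (c :: rest)
              ((PySem.List.pyRange (i : Int) (m : Int) 1).map
                (fun j => String.ofList ('p' :: PySem.Int.toChars j)))
            = c :: bEmit rest ((PySem.List.pyRange (i : Int) (m : Int) 1).map
                (fun j => String.ofList ('p' :: PySem.Int.toChars j))) from by
            simp [bEmit, hc],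
          ih i m (by simp [List.count_cons, hc] at h; omega), scanT, if_neg hc]

-- B-side: zipping range-generated keys with params is exactly aPairs
theorem zip_aPairs (ps : List String) : ∀ (i : Nat),
    ((PySem.List.pyRange (i : Int) ((i : Int) + ps.length) 1).map
      (fun j => String.ofList ('p' :: PySem.Int.toChars j))).zip ps = aPairs ps i := by
  induction ps with
  | nil => intro i; simp [aPairs]
  | cons v rest ih =>
      intro i
      have him : (i : Int) < (i : Int) + (v :: rest).length := by simp
      rw [PySem.List.pyRange_one_cons him, List.map_cons, List.zip_cons_cons, aPairs]
      have hcast : (i : Int) + 1 = ((i + 1 : Nat) : Int) := by push_cast; ring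
      have harg : (i : Int) + (v :: rest).length = ((i + 1 : Nat) : Int) + rest.length := by
        simp; push_cast; ring
      rw [harg, hcast, ih (i + 1)]

theorem ofList_insFold (l : List (String × String)) :
    PySem.Dict.ofList l = insFold PySem.Dict.empty l := rfl

theorem equiv_main (sql : String) (params : List String)
    (hpre : sql.toList.count '?' = 0 ∨ sql.toList.count '?' = params.length) :
    convert_qmark_sql_py sql params = convert_qmark_sql_py_alt sql params := by
  by_cases h0 : sql.toList.count '?' = 0
  · simp [convert_qmark_sql_py, convert_qmark_sql_py_alt, count_q, h0]
  · have hlen : sql.toList.count '?' = params.length := hpre.resolve_left h0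
    have hget0 : PySem.List.pyGetD (splitQ sql.toList) 0 []
        = (splitQ sql.toList).headD [] := by
      rw [show (0 : Int) = ((0 : Nat) : Int) from rfl, PySem.List.pyGetD_natCast,
        ← headD_drop, List.drop_zero]
    have ha := afold (splitQ sql.toList) params 0
      (PySem.List.pyGetD (splitQ sql.toList) 0 []) PySem.Dict.empty
    simp only [Nat.cast_zero] at ha
    simp only [convert_qmark_sql_py, convert_qmark_sql_py_alt, count_q, if_neg h0, split_q, ha]
    have hb := bEmit_scanT sql.toList 0 (sql.toList.count '?') (by omega)
    simp only [Nat.cast_zero] at hb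
    have hz := zip_aPairs params 0
    simp only [Nat.cast_zero, zero_add] at hz
    rw [hget0, aText_weave, List.drop_one, text_bridge sql.toList params 0 hlen,
      ofList_insFold, hlen] at *
    rw [← hb, ← hz, hlen]

-- ===== VERDICT (by name: the statement is the Claim_ definition above) =====
theorem convert_qmark_sql_py_spec : Claim_equal_convert_qmark_sql_py := by
  intro sql params _ hpre
  unfold Spec_convert_qmark_sql_py
  exact equiv_main sql params hpre
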